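-- pv_equiv track=rewrite | github.com/givitallugot/Algorithm-Study2 | 프로그래머스-lvl2-구명보트.py | solution
-- ===== SOURCE A (Python) =====
-- def solution(people, limit):
--     answer = 0
--     people.sort(reverse=True)
--
--     while people:
--         boat = people.pop(0)
--         answer += 1
--
--         while people:
--             if (boat + people[-1]) <= limit:
--                 boat += people.pop(-1)
--             else:
--                 break
--
--
--     return answer
-- ===== SOURCE B (Python) =====
-- def solution(people, limit):
--     ppl = sorted(people)
--     answer = 0
--     lo = 0
--     hi = len(ppl) - 1
--     while lo <= hi:
--         boat = ppl[hi]
--         hi -= 1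
--         answer += 1
--         while lo <= hi and boat + ppl[lo] <= limit:
--             boat += ppl[lo]
--             lo += 1
--     return answer
-- ===== Notes on version B (the rewrite author's own statement) =====
-- stated objective: alternative
-- what changed: Replaces destructive pop(0)/pop(-1) on a descending-sorted list with two index pointers sweeping a once-sorted ascending array; B never mutates its argument.
import Mathlib
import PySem

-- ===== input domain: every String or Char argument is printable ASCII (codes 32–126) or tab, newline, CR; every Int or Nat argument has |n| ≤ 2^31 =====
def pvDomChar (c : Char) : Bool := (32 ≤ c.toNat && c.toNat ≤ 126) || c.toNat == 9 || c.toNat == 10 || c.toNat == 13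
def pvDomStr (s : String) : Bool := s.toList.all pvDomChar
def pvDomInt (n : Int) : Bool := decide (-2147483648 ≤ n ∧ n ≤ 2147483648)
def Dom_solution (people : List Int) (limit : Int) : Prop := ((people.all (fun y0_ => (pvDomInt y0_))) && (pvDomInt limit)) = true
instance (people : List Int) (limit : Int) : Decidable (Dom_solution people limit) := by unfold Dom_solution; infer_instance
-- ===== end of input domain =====

-- B replaces A's destructive pop(0)/pop(-1) on a descending-sorted list by two index
-- pointers over a once-sorted ascending array (objective: alternative; the equivalence proved is
-- about the RETURN value only — Python A sorts and empties its 'people' argument in place, B does not).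
-- The Nat 'fuel' arguments below are totality guards only (fuel = the loop's measure);
-- each loop body is the literal transcription of its Python loop.

-- ===== PORT A =====
-- inner loop 'while people: if boat + people[-1] <= limit: boat += people.pop(-1) else: break'
-- (people[-1] is pyGetD at -1; pop(-1) on a nonempty list is exactly (getLast, dropLast))
def aInnerF (limit : Int) : Nat → Int → List Int → Int × List Int
  | 0, boat, people => (boat, people)
  | fuel+1, boat, people =>
    if h : people = [] then (boat, people)
    else if boat + PySem.List.pyGetD people (-1) 0 ≤ limit then
      aInnerF limit fuel (boat + people.getLast h) people.dropLast
    else (boat, people)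

def aInner (limit boat : Int) (people : List Int) : Int × List Int :=
  aInnerF limit people.length boat people

-- outer loop 'while people: boat = people.pop(0); answer += 1; <inner loop>'
-- (pop(0) on a nonempty list is exactly (head, tail))
def aOuterF (limit : Int) : Nat → List Int → Int → Int
  | 0, _, answer => answer
  | fuel+1, people, answer =>
    if h : people = [] then answer
    else aOuterF limit fuel (aInner limit (people.head h) people.tail).2 (answer + 1)

def aOuter (limit : Int) (people : List Int) (answer : Int) : Int :=
  aOuterF limit people.length people answer

def solution (people : List Int) (limit : Int) : Int :=
  aOuter limit (PySem.List.sorted people (fun x => x) true) 0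

-- ===== PORT B =====
-- inner loop 'while lo <= hi and boat + ppl[lo] <= limit: boat += ppl[lo]; lo += 1'; returns lo
def bInnerF (ppl : List Int) (limit : Int) : Nat → Int → Int → Int → Int
  | 0, _, lo, _ => lo
  | fuel+1, boat, lo, hi =>
    if lo ≤ hi ∧ boat + PySem.List.pyGetD ppl lo 0 ≤ limit then
      bInnerF ppl limit fuel (boat + PySem.List.pyGetD ppl lo 0) (lo + 1) hi
    else lo

def bInner (ppl : List Int) (limit boat lo hi : Int) : Int :=
  bInnerF ppl limit (hi + 1 - lo).toNat boat lo hi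

-- outer loop 'while lo <= hi: boat = ppl[hi]; hi -= 1; answer += 1; <inner loop>'
def bOuterF (ppl : List Int) (limit : Int) : Nat → Int → Int → Int → Int
  | 0, _, _, answer => answer
  | fuel+1, lo, hi, answer =>
    if lo ≤ hi then
      bOuterF ppl limit fuel (bInner ppl limit (PySem.List.pyGetD ppl hi 0) lo (hi - 1)) (hi - 1) (answer + 1)
    else answer

def bOuter (ppl : List Int) (limit lo hi answer : Int) : Int :=
  bOuterF ppl limit (hi + 1 - lo).toNat lo hi answer

def solution_alt (people : List Int) (limit : Int) : Int :=
  bOuter (PySem.List.sorted people (fun x => x) false) limit 0 ((people.length : Int) - 1) 0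

-- ===== PRECONDITION & SPEC =====
def Spec_solution (people : List Int) (limit : Int) (out : Int) : Prop := out = solution_alt people limit
instance (people : List Int) (limit : Int) (out : Int) : Decidable (Spec_solution people limit out) := by unfold Spec_solution; infer_instance

-- ===== CLAIM (what is proved, stated in full; the proofs are below) =====
def Claim_equal_solution : Prop := ∀ (people : List Int) (limit : Int), Dom_solution people limit → Spec_solution people limit (solution people limit)

-- ===== LEMMAS AND PROOFS =====

theorem aInnerF_len (limit : Int) :
    ∀ fuel (boat : Int) (people : List Int),
      (aInnerF limit fuel boat people).2.length ≤ people.length := by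
  intro fuel
  induction fuel with
  | zero => intro boat people; simp [aInnerF]
  | succ fuel ih =>
    intro boat people
    rw [aInnerF]
    split
    · simp
    · next hne =>
      split
      · have h1 : people.dropLast.length = people.length - 1 := List.length_dropLast
        have h2 : people.length ≠ 0 := by simpa using hne
        have := ih (boat + people.getLast hne) people.dropLast
        omega
      · simp

theorem aInner_len (limit boat : Int) (people : List Int) :
    (aInner limit boat people).2.length ≤ people.length :=
  aInnerF_len limit people.length boat people

theorem aInner_unfold (limit boat : Int) (people : List Int) :
    aInner limit boat people =
      if h : people = [] then (boat, people)
      else if boat + PySem.List.pyGetD people (-1) 0 ≤ limit then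
        aInner limit (boat + people.getLast h) people.dropLast
      else (boat, people) := by
  cases people with
  | nil => simp [aInner, aInnerF]
  | cons p ps =>
    rw [dif_neg (by simp)]
    show aInnerF limit (ps.length + 1) boat (p :: ps) = _
    rw [aInnerF, dif_neg (by simp)]
    have hl : (p :: ps).dropLast.length = ps.length := by simp
    rw [aInner, hl]

theorem aOuterF_nil (limit ans : Int) : ∀ fuel, aOuterF limit fuel [] ans = ans := by
  intro fuel
  cases fuel with
  | zero => rfl
  | succ fuel => rw [aOuterF, dif_pos rfl]

theorem aOuterF_irrel (limit : Int) :
    ∀ f g (people : List Int) (ans : Int), people.length ≤ f → people.length ≤ g →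
      aOuterF limit f people ans = aOuterF limit g people ans := by
  intro f
  induction f with
  | zero =>
    intro g people ans hf hg
    have : people = [] := List.eq_nil_of_length_eq_zero (by omega)
    subst this
    rw [aOuterF_nil, aOuterF_nil]
  | succ f ih =>
    intro g people ans hf hg
    cases people with
    | nil => rw [aOuterF_nil, aOuterF_nil]
    | cons p ps =>
      obtain ⟨g', rfl⟩ : ∃ g', g = g' + 1 := ⟨g - 1, by simp at hg; omega⟩
      rw [aOuterF, aOuterF, dif_neg (by simp), dif_neg (by simp)]
      simp only [List.head_cons, List.tail_cons]
      have hlen := aInner_len limit p ps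
      exact ih g' _ (ans + 1) (by simp at hf; omega) (by simp at hg; omega)

theorem aOuter_unfold (limit : Int) (people : List Int) (ans : Int) :
    aOuter limit people ans =
      if h : people = [] then ans
      else aOuter limit (aInner limit (people.head h) people.tail).2 (ans + 1) := by
  cases people with
  | nil => simp [aOuter, aOuterF]
  | cons p ps =>
    rw [dif_neg (by simp)]
    show aOuterF limit (ps.length + 1) (p :: ps) ans = _
    rw [aOuterF, dif_neg (by simp)]
    simp only [List.head_cons, List.tail_cons]
    exact aOuterF_irrel limit ps.length _ _ (ans + 1) (aInner_len ..) le_rfl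

theorem bInner_unfold (ppl : List Int) (limit boat lo hi : Int) :
    bInner ppl limit boat lo hi =
      if lo ≤ hi ∧ boat + PySem.List.pyGetD ppl lo 0 ≤ limit then
        bInner ppl limit (boat + PySem.List.pyGetD ppl lo 0) (lo + 1) hi
      else lo := by
  by_cases hlh : lo ≤ hi
  · rw [bInner, show (hi + 1 - lo).toNat = (hi + 1 - (lo + 1)).toNat + 1 by omega, bInnerF]
    rfl
  · rw [bInner, show (hi + 1 - lo).toNat = 0 by omega, bInnerF,
      if_neg (fun h => hlh h.1)]

theorem bInnerF_ge (ppl : List Int) (limit : Int) :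
    ∀ fuel (boat lo hi : Int), lo ≤ bInnerF ppl limit fuel boat lo hi := by
  intro fuel
  induction fuel with
  | zero => intro boat lo hi; simp [bInnerF]
  | succ fuel ih =>
    intro boat lo hi
    rw [bInnerF]
    split
    · have := ih (boat + PySem.List.pyGetD ppl lo 0) (lo + 1) hi; omega
    · omega

theorem bInner_ge (ppl : List Int) (limit boat lo hi : Int) :
    lo ≤ bInner ppl limit boat lo hi :=
  bInnerF_ge ppl limit (hi + 1 - lo).toNat boat lo hi

theorem bOuterF_gt (ppl : List Int) (limit lo hi ans : Int) (h : hi < lo) :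
    ∀ fuel, bOuterF ppl limit fuel lo hi ans = ans := by
  intro fuel
  cases fuel with
  | zero => rfl
  | succ fuel => rw [bOuterF, if_neg (by omega)]

theorem bOuterF_irrel (ppl : List Int) (limit : Int) :
    ∀ f g (lo hi ans : Int), (hi + 1 - lo).toNat ≤ f → (hi + 1 - lo).toNat ≤ g →
      bOuterF ppl limit f lo hi ans = bOuterF ppl limit g lo hi ans := by
  intro f
  induction f with
  | zero =>
    intro g lo hi ans hf hg
    rw [bOuterF_gt ppl limit lo hi ans (by omega), bOuterF_gt ppl limit lo hi ans (by omega)]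
  | succ f ih =>
    intro g lo hi ans hf hg
    by_cases hlh : lo ≤ hi
    · obtain ⟨g', rfl⟩ : ∃ g', g = g' + 1 := ⟨g - 1, by omega⟩
      rw [bOuterF, bOuterF, if_pos hlh, if_pos hlh]
      have hge := bInner_ge ppl limit (PySem.List.pyGetD ppl hi 0) lo (hi - 1)
      exact ih g' _ (hi - 1) (ans + 1) (by omega) (by omega)
    · rw [bOuterF_gt ppl limit lo hi ans (by omega), bOuterF_gt ppl limit lo hi ans (by omega)]

theorem bOuter_unfold (ppl : List Int) (limit lo hi ans : Int) :
    bOuter ppl limit lo hi ans =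
      if lo ≤ hi then
        bOuter ppl limit (bInner ppl limit (PySem.List.pyGetD ppl hi 0) lo (hi - 1)) (hi - 1) (ans + 1)
      else ans := by
  by_cases hlh : lo ≤ hi
  · rw [if_pos hlh, bOuter, show (hi + 1 - lo).toNat = (hi + 1 - lo).toNat - 1 + 1 by omega,
      bOuterF, if_pos hlh]
    have hge := bInner_ge ppl limit (PySem.List.pyGetD ppl hi 0) lo (hi - 1)
    exact bOuterF_irrel ppl limit _ _ _ (hi - 1) (ans + 1) (by omega) (by omega)
  · rw [if_neg hlh, bOuter, bOuterF_gt ppl limit lo hi ans (by omega)]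

-- the ascending segment ppl[lo..hi]; A's working list is always (seg …).reverse
def seg (ppl : List Int) (lo hi : Int) : List Int :=
  (ppl.drop lo.toNat).take (hi + 1 - lo).toNat

theorem seg_nil (ppl : List Int) (lo hi : Int) (h : hi < lo) : seg ppl lo hi = [] := by
  simp [seg]; omega

theorem pyGetD_toNat (xs : List Int) (i d : Int) (h : 0 ≤ i) :
    PySem.List.pyGetD xs i d = xs.getD i.toNat d := by
  have h1 : i = ((i.toNat : Nat) : Int) := by omega
  calc PySem.List.pyGetD xs i d = PySem.List.pyGetD xs ((i.toNat : Nat) : Int) d := by rw [← h1]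
    _ = xs.getD i.toNat d := PySem.List.pyGetD_natCast ..

theorem seg_cons (ppl : List Int) (lo hi : Int) (h0 : 0 ≤ lo) (hle : lo ≤ hi)
    (hlt : lo.toNat < ppl.length) :
    seg ppl lo hi = ppl.getD lo.toNat 0 :: seg ppl (lo + 1) hi := by
  unfold seg
  rw [show (lo + 1).toNat = lo.toNat + 1 by omega, List.drop_eq_getElem_cons hlt,
    show (hi + 1 - lo).toNat = (hi + 1 - (lo + 1)).toNat + 1 by omega,
    List.take_succ_cons, List.getD_eq_getElem ppl 0 hlt]

theorem seg_concat (ppl : List Int) (lo hi : Int) (h0 : 0 ≤ lo) (hle : lo ≤ hi)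
    (hhi : hi < (ppl.length : Int)) :
    seg ppl lo hi = seg ppl lo (hi - 1) ++ [ppl.getD hi.toNat 0] := by
  have hm : (hi - lo).toNat < (ppl.drop lo.toNat).length := by
    rw [List.length_drop]; omega
  have hh : hi.toNat < ppl.length := by omega
  unfold seg
  rw [show (hi - 1 + 1 - lo).toNat = (hi - lo).toNat by omega,
    show (hi + 1 - lo).toNat = (hi - lo).toNat + 1 by omega, List.take_add_one,
    List.getElem?_eq_getElem hm, List.getElem_drop, List.getD_eq_getElem ppl 0 hh]
  have hidx : lo.toNat + (hi - lo).toNat = hi.toNat := by omega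
  congr 2
  simp only [Option.toList_some, List.cons.injEq, and_true]
  exact getElem_congr_idx (c := ppl) (i := lo.toNat + (hi - lo).toNat) (j := hi.toNat) hidx

theorem aInner_concat (limit boat : Int) (xs : List Int) (a : Int) :
    aInner limit boat (xs ++ [a]) =
      if boat + a ≤ limit then aInner limit (boat + a) xs else (boat, xs ++ [a]) := by
  rw [aInner_unfold, dif_neg (by simp), PySem.List.pyGetD_neg_one_append_singleton,
    List.getLast_append, List.dropLast_concat]
  simp

theorem inner_eq (ppl : List Int) (limit : Int) :
    ∀ n (boat lo hi : Int), (hi + 1 - lo).toNat ≤ n → 0 ≤ lo → hi < (ppl.length : Int) →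
    (aInner limit boat (seg ppl lo hi).reverse).2 =
      (seg ppl (bInner ppl limit boat lo hi) hi).reverse := by
  intro n
  induction n with
  | zero =>
    intro boat lo hi hn h0 hhi
    rw [bInner_unfold, if_neg (by omega), seg_nil ppl lo hi (by omega), List.reverse_nil,
      aInner_unfold, dif_pos rfl]
  | succ n ih =>
    intro boat lo hi hn h0 hhi
    by_cases hlh : lo ≤ hi
    · have hlt : lo.toNat < ppl.length := by omega
      have hget : PySem.List.pyGetD ppl lo 0 = ppl.getD lo.toNat 0 := pyGetD_toNat ppl lo 0 h0
      have hseg : (seg ppl lo hi).reverse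
          = (seg ppl (lo + 1) hi).reverse ++ [ppl.getD lo.toNat 0] := by
        rw [seg_cons ppl lo hi h0 hlh hlt, List.reverse_cons]
      rw [hseg, aInner_concat, bInner_unfold, hget]
      by_cases hc : boat + ppl.getD lo.toNat 0 ≤ limit
      · rw [if_pos hc, if_pos ⟨hlh, hc⟩]
        exact ih (boat + ppl.getD lo.toNat 0) (lo + 1) hi (by omega) (by omega) hhi
      · rw [if_neg hc, if_neg (fun h => hc h.2), ← hseg]
    · rw [bInner_unfold, if_neg (by omega), seg_nil ppl lo hi (by omega), List.reverse_nil,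
        aInner_unfold, dif_pos rfl]

theorem outer_eq (ppl : List Int) (limit : Int) :
    ∀ n (lo hi ans : Int), (hi + 1 - lo).toNat ≤ n → 0 ≤ lo → hi < (ppl.length : Int) →
    aOuter limit (seg ppl lo hi).reverse ans = bOuter ppl limit lo hi ans := by
  intro n
  induction n with
  | zero =>
    intro lo hi ans hn h0 hhi
    rw [seg_nil ppl lo hi (by omega), List.reverse_nil, aOuter_unfold, dif_pos rfl,
      bOuter_unfold, if_neg (by omega)]
  | succ n ih =>
    intro lo hi ans hn h0 hhi
    by_cases hlh : lo ≤ hi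
    · have hget : PySem.List.pyGetD ppl hi 0 = ppl.getD hi.toNat 0 :=
        pyGetD_toNat ppl hi 0 (by omega)
      have hseg : (seg ppl lo hi).reverse
          = ppl.getD hi.toNat 0 :: (seg ppl lo (hi - 1)).reverse := by
        rw [seg_concat ppl lo hi h0 hlh hhi, List.reverse_append, List.reverse_singleton,
          List.singleton_append]
      rw [hseg, aOuter_unfold, dif_neg (by simp), bOuter_unfold, if_pos hlh, hget]
      simp only [List.head_cons, List.tail_cons]
      have hge : lo ≤ bInner ppl limit (ppl.getD hi.toNat 0) lo (hi - 1) := bInner_ge ..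
      rw [inner_eq ppl limit n _ lo (hi - 1) (by omega) h0 (by omega)]
      exact ih _ (hi - 1) (ans + 1) (by omega) (by omega) (by omega)
    · rw [seg_nil ppl lo hi (by omega), List.reverse_nil, aOuter_unfold, dif_pos rfl,
        bOuter_unfold, if_neg (by omega)]

theorem sorted_rev_eq (xs : List Int) :
    PySem.List.sorted xs (fun x => x) true = (PySem.List.sorted xs (fun x => x) false).reverse := by
  have h : PySem.List.sorted xs (fun x => x) false
      = (PySem.List.sorted xs (fun x => x) true).reverse := by
    apply PySem.List.sorted_id_eq_of_perm_of_pairwise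
    · exact (List.reverse_perm _).trans (PySem.List.sorted_perm ..)
    · rw [List.pairwise_reverse]
      exact PySem.List.sorted_pairwise_rev ..
  rw [h, List.reverse_reverse]

-- ===== VERDICT (by name: the statement is the Claim_ definition above) =====
theorem solution_spec : Claim_equal_solution := by
  intro people limit _
  unfold Spec_solution solution solution_alt
  rw [sorted_rev_eq]
  set ppl := PySem.List.sorted people (fun x => x) false with hp
  have hlen : ppl.length = people.length := PySem.List.length_sorted ..
  have h0 : (seg ppl 0 ((people.length : Int) - 1)).reverse = ppl.reverse := by
    simp [seg, hlen]
  rw [← h0]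
  exact outer_eq ppl limit ((people.length : Int)).toNat 0 _ 0 (by omega) le_rfl (by omega)
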